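-- pv_equiv track=rewrite | github.com/stanleyshuang/vulnrep | app/pkg/_qjira/description.py | extract_pf_pt_ver
-- ===== SOURCE A (Python) =====
-- def extract_pf_pt_ver(content):
--     """
--     example:    [CVE-2021-28815][FIX]: [QTS 4.5.3] [myQNAPcloud Link] [2.2.21]
--     return:     [QTS 4.5.3, myQNAPcloud Link, 2.2.21]
--     """
--     version_data = []
--     idx = content.find("[FIX]:")
--     if idx >= 0:
--         idx_head = 0
--         idx_tail = 0
--         pf_pt_ver = content[idx + len("[FIX]:") :]
--         while idx_head >= 0 and idx_tail >= 0:
--             idx_head = pf_pt_ver.find("[", idx_head)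
--             idx_tail = pf_pt_ver.find("]", idx_tail)
--             if idx_head < 0 or idx_tail < 0:
--                 break
--             item = pf_pt_ver[idx_head + 1 : idx_tail]
--             version_data.append(item)
--             idx_head += 1
--             idx_tail += 1
--     return version_data
-- ===== SOURCE B (Python) =====
-- def extract_pf_pt_ver(content):
--     idx = content.find("[FIX]:")
--     if idx < 0:
--         return []
--     s = content[idx + len("[FIX]:"):]
--     opens = [i for i, c in enumerate(s) if c == '[']
--     closes = [i for i, c in enumerate(s) if c == ']']
--     return [s[h + 1:t] for h, t in zip(opens, closes)]
-- ===== Notes on version B (the rewrite author's own statement) =====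
-- stated objective: simpler
-- what changed: Replaces the interleaved dual-pointer while loop of repeated str.find calls with two comprehension passes collecting '[' and ']' positions, paired by zip and turned into slices.
import Mathlib
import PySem

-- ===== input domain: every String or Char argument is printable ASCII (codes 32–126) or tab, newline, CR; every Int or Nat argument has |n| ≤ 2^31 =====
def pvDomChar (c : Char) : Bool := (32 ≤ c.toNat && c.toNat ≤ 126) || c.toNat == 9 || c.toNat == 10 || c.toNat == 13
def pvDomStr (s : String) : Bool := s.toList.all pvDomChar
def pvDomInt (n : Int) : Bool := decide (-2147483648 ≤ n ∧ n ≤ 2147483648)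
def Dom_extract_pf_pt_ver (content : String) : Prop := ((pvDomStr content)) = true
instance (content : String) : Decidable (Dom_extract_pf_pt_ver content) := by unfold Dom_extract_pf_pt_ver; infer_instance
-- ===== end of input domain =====

-- B replaces A's interleaved dual-pointer find loop by two position-gathering passes paired with zip (objective: simpler).


-- ===== PORT A =====
-- termination fact for the while loop: a successful find lands at an index ≥ the start and < the length
theorem pvFindFrom_bounds (s sub : List Char) (h : Nat) (hsub : sub ≠ [])
    (hr : ¬ PySem.Chars.findFrom s sub (h : Int) none < 0) :
    h ≤ (PySem.Chars.findFrom s sub (h : Int) none).toNat ∧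
      (PySem.Chars.findFrom s sub (h : Int) none).toNat < s.length := by
  by_cases hle : h ≤ s.length
  · have hne : PySem.Chars.findFrom s sub (h : Int) none ≠ -1 := by omega
    obtain ⟨h1, h2, _⟩ := PySem.Chars.findFrom_natCast_spec s sub h hle hne
    have hlen := h2.length_le
    have hd : (s.drop (PySem.Chars.findFrom s sub (h : Int) none).toNat).length
        = s.length - (PySem.Chars.findFrom s sub (h : Int) none).toNat := List.length_drop
    have hs1 : 1 ≤ sub.length := List.length_pos_iff.mpr hsub
    omega
  · exfalso
    apply hr
    simp only [PySem.Chars.findFrom]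
    split_ifs with h1 h2 h3 <;> omega

-- compact decreasing fact so the loop's termination proof term stays small
theorem pvLoopA_dec (s : List Char) (h t : Nat)
    (hcond : ¬(PySem.Chars.findFrom s ['['] (h : Int) none < 0 ∨
               PySem.Chars.findFrom s [']'] (t : Int) none < 0)) :
    s.length - ((PySem.Chars.findFrom s ['['] (h : Int) none).toNat + 1) < s.length - h := by
  have := pvFindFrom_bounds s ['['] h (by simp) (fun hlt => hcond (Or.inl hlt))
  omega

-- the while loop of A: idx_head/idx_tail advance through repeated str.find calls
def pvLoopA (s : List Char) (h t : Nat) : List String :=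
  if PySem.Chars.findFrom s ['['] (h : Int) none < 0 ∨
     PySem.Chars.findFrom s [']'] (t : Int) none < 0 then []
  else
    String.ofList (PySem.List.slice s (some (PySem.Chars.findFrom s ['['] (h : Int) none + 1))
        (some (PySem.Chars.findFrom s [']'] (t : Int) none))) ::
      pvLoopA s ((PySem.Chars.findFrom s ['['] (h : Int) none).toNat + 1)
               ((PySem.Chars.findFrom s [']'] (t : Int) none).toNat + 1)
termination_by s.length - h
decreasing_by
  rename_i hcond
  exact pvLoopA_dec s h t hcond

def extract_pf_pt_ver (content : String) : List String :=
  if 0 ≤ PySem.Str.find content "[FIX]:" then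
    pvLoopA (PySem.Str.slice content (some (PySem.Str.find content "[FIX]:" + 6)) none).toList 0 0
  else []

-- ===== PORT B =====
-- [i for i, c in enumerate(s) if c == b]
def pvBracketIdxs (b : Char) (s : List Char) : List Int :=
  ((PySem.List.enumerate s).filter (fun p => p.2 == b)).map Prod.fst

def extract_pf_pt_ver_alt (content : String) : List String :=
  if PySem.Str.find content "[FIX]:" < 0 then []
  else
    let s := (PySem.Str.slice content (some (PySem.Str.find content "[FIX]:" + 6)) none).toList
    ((pvBracketIdxs '[' s).zip (pvBracketIdxs ']' s)).map
      (fun p => String.ofList (PySem.List.slice s (some (p.1 + 1)) (some p.2)))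

-- ===== PRECONDITION & SPEC =====
def Spec_extract_pf_pt_ver (content : String) (out : List String) : Prop := out = extract_pf_pt_ver_alt content
instance (content : String) (out : List String) : Decidable (Spec_extract_pf_pt_ver content out) := by unfold Spec_extract_pf_pt_ver; infer_instance

-- ===== CLAIM (what is proved, stated in full; the proofs are below) =====
def Claim_equal_extract_pf_pt_ver : Prop := ∀ (content : String), Dom_extract_pf_pt_ver content → Spec_extract_pf_pt_ver content (extract_pf_pt_ver content)

-- ===== LEMMAS AND PROOFS =====

-- positions of b in a char list, in increasing order
def pvOccs (b : Char) : List Char → List Nat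
  | [] => []
  | x :: xs => if x = b then 0 :: (pvOccs b xs).map (· + 1) else (pvOccs b xs).map (· + 1)

-- positions of b in s at index ≥ h
def pvGe (b : Char) (s : List Char) (h : Nat) : List Nat := (pvOccs b (s.drop h)).map (· + h)

def pvF (s : List Char) (p : Nat × Nat) : String :=
  String.ofList (PySem.List.slice s (some ((p.1 : Int) + 1)) (some (p.2 : Int)))

theorem pvOccs_eq_nil_iff (b : Char) (l : List Char) : pvOccs b l = [] ↔ b ∉ l := by
  induction l with
  | nil => simp [pvOccs]
  | cons x xs ih =>
    by_cases hx : x = b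
    · simp [pvOccs, hx]
    · have hbx : ¬ b = x := fun hb => hx hb.symm
      simp [pvOccs, hx, List.map_eq_nil_iff, ih, hbx]

theorem pvSingleton_prefix_iff (b : Char) (l : List Char) : [b] <+: l ↔ l.head? = some b := by
  cases l with
  | nil => simp
  | cons x xs =>
    constructor
    · rintro ⟨t, ht⟩; simp at ht; simp [ht.1]
    · intro h; simp at h; exact ⟨xs, by simp [h]⟩

theorem pvSingleton_infix_iff (b : Char) (l : List Char) : [b] <:+: l ↔ b ∈ l := by
  constructor
  · intro h; exact h.subset (by simp)
  · intro h
    obtain ⟨u, v, huv⟩ := List.append_of_mem h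
    exact ⟨u, v, by simp [huv]⟩

theorem pvOccs_first (b : Char) : ∀ (j : Nat) (l : List Char), l[j]? = some b →
    (∀ i, i < j → l[i]? ≠ some b) →
    pvOccs b l = j :: (pvOccs b (l.drop (j + 1))).map (· + (j + 1)) := by
  intro j
  induction j with
  | zero =>
    intro l hj _
    cases l with
    | nil => simp at hj
    | cons x xs =>
      simp at hj
      simp [pvOccs, hj]
  | succ j ih =>
    intro l hj hmin
    cases l with
    | nil => simp at hj
    | cons x xs =>
      have hx : x ≠ b := by
        have := hmin 0 (by omega); simpa using this
      have hxs := ih xs (by simpa using hj)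
        (fun i hi => by have := hmin (i + 1) (by omega); simpa using this)
      simp only [pvOccs, if_neg hx, hxs, List.map_cons, List.map_map, List.drop_succ_cons]
      refine List.cons_eq_cons.mpr ⟨rfl, ?_⟩
      apply List.map_congr_left
      intro a _
      simp only [Function.comp_apply]
      omega

theorem pvGe_nil (b : Char) (s : List Char) (h : Nat) (hle : h ≤ s.length)
    (hr : PySem.Chars.findFrom s [b] (h : Int) none < 0) : pvGe b s h = [] := by
  have heq : PySem.Chars.findFrom s [b] (h : Int) none = -1 := by
    by_contra hne
    obtain ⟨h1, _, _⟩ := PySem.Chars.findFrom_natCast_spec s [b] h hle hne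
    omega
  have := (PySem.Chars.findFrom_natCast_eq_neg_one_iff s [b] h hle).mp heq
  rw [pvSingleton_infix_iff] at this
  simp [pvGe, (pvOccs_eq_nil_iff b _).mpr this]

theorem pvGe_cons (b : Char) (s : List Char) (h : Nat) (hle : h ≤ s.length)
    (hr : ¬ PySem.Chars.findFrom s [b] (h : Int) none < 0) :
    pvGe b s h = (PySem.Chars.findFrom s [b] (h : Int) none).toNat ::
      pvGe b s ((PySem.Chars.findFrom s [b] (h : Int) none).toNat + 1) := by
  set r := PySem.Chars.findFrom s [b] (h : Int) none with hrdef
  have hne : r ≠ -1 := by omega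
  obtain ⟨h1, h2, h3⟩ := PySem.Chars.findFrom_natCast_spec s [b] h hle hne
  have hhr : h ≤ r.toNat := by omega
  set j : Nat := r.toNat - h with hjdef
  have hrj : r.toNat = h + j := by omega
  have hj : (s.drop h)[j]? = some b := by
    have h2' : (s.drop r.toNat).head? = some b := (pvSingleton_prefix_iff b _).mp h2
    rw [List.head?_drop] at h2'
    rw [List.getElem?_drop, ← hrj]
    exact h2'
  have hmin : ∀ i, i < j → (s.drop h)[i]? ≠ some b := by
    intro i hi
    have hm := h3 (h + i) (by omega) (by omega)
    rw [pvSingleton_prefix_iff, List.head?_drop] at hm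
    rw [List.getElem?_drop]
    exact hm
  have hocc := pvOccs_first b j (s.drop h) hj hmin
  simp only [pvGe, hocc, List.map_cons, List.map_map, List.drop_drop]
  refine List.cons_eq_cons.mpr ⟨by omega, ?_⟩
  have e2 : r.toNat + 1 = j + 1 + h := by omega
  have e3 : h + (j + 1) = j + 1 + h := by omega
  rw [e2, e3]
  apply List.map_congr_left
  intro a _
  simp only [Function.comp_apply]
  omega

theorem pvLoop_eq (s : List Char) : ∀ (n h t : Nat), s.length - h ≤ n →
    h ≤ s.length → t ≤ s.length →
    pvLoopA s h t = ((pvGe '[' s h).zip (pvGe ']' s t)).map (pvF s) := by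
  intro n
  induction n with
  | zero =>
    intro h t hn hh ht
    rw [pvLoopA]
    by_cases hO : PySem.Chars.findFrom s ['['] (h : Int) none < 0
    · have := pvGe_nil '[' s h hh hO
      simp [hO, this]
    · exfalso
      have := pvFindFrom_bounds s ['['] h (by simp) hO
      omega
  | succ n ih =>
    intro h t hn hh ht
    rw [pvLoopA]
    by_cases hO : PySem.Chars.findFrom s ['['] (h : Int) none < 0
    · have := pvGe_nil '[' s h hh hO
      simp [hO, this]
    · by_cases hC : PySem.Chars.findFrom s [']'] (t : Int) none < 0
      · have := pvGe_nil ']' s t ht hC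
        simp [hC, this]
      · have hbO := pvFindFrom_bounds s ['['] h (by simp) hO
        have hbC := pvFindFrom_bounds s [']'] t (by simp) hC
        rw [if_neg (by tauto)]
        rw [pvGe_cons '[' s h hh hO, pvGe_cons ']' s t ht hC]
        rw [List.zip_cons_cons, List.map_cons]
        have b1 : s.length - ((PySem.Chars.findFrom s ['['] (h : Int) none).toNat + 1) ≤ n := by omega
        have b2 : (PySem.Chars.findFrom s ['['] (h : Int) none).toNat + 1 ≤ s.length := by omega
        have b3 : (PySem.Chars.findFrom s [']'] (t : Int) none).toNat + 1 ≤ s.length := by omega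
        rw [ih _ _ b1 b2 b3]
        have eO : (((PySem.Chars.findFrom s ['['] (h : Int) none).toNat : Int)) =
            PySem.Chars.findFrom s ['['] (h : Int) none := Int.toNat_of_nonneg (by omega)
        have eC : (((PySem.Chars.findFrom s [']'] (t : Int) none).toNat : Int)) =
            PySem.Chars.findFrom s [']'] (t : Int) none := Int.toNat_of_nonneg (by omega)
        congr 1
        simp only [pvF, eO, eC]

theorem pvBracketIdxs_eq (b : Char) : ∀ (l : List Char) (k : Int),
    ((PySem.List.enumerate l k).filter (fun p => p.2 == b)).map Prod.fst
      = (pvOccs b l).map (fun i : Nat => ((i : Int) + k)) := by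
  intro l
  induction l with
  | nil => intro k; simp [PySem.List.enumerate_nil, pvOccs]
  | cons x xs ih =>
    intro k
    rw [PySem.List.enumerate_cons, List.filter_cons]
    by_cases hx : x = b
    · rw [if_pos (by simp [hx])]
      have hocc : pvOccs b (x :: xs) = 0 :: (pvOccs b xs).map (· + 1) := by
        simp [pvOccs, hx]
      rw [hocc, List.map_cons, List.map_cons, ih (k + 1), List.map_map]
      refine List.cons_eq_cons.mpr ⟨by simp, ?_⟩
      apply List.map_congr_left
      intro a _
      simp only [Function.comp_apply]
      push_cast
      ring
    · rw [if_neg (by simp [hx])]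
      have hocc : pvOccs b (x :: xs) = (pvOccs b xs).map (· + 1) := by
        simp [pvOccs, hx]
      rw [hocc, ih (k + 1), List.map_map]
      apply List.map_congr_left
      intro a _
      simp only [Function.comp_apply]
      push_cast
      ring

-- ===== VERDICT (by name: the statement is the Claim_ definition above) =====
theorem extract_pf_pt_ver_spec : Claim_equal_extract_pf_pt_ver := by
  unfold Claim_equal_extract_pf_pt_ver
  intro content _
  unfold Spec_extract_pf_pt_ver extract_pf_pt_ver extract_pf_pt_ver_alt
  by_cases hidx : PySem.Str.find content "[FIX]:" < 0
  · rw [if_neg (by omega), if_pos hidx]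
  · rw [if_pos (by omega), if_neg hidx]
    set s := (PySem.Str.slice content (some (PySem.Str.find content "[FIX]:" + 6)) none).toList with hs
    have hO := pvBracketIdxs_eq '[' s 0
    have hC := pvBracketIdxs_eq ']' s 0
    simp only [add_zero] at hO hC
    show pvLoopA s 0 0 = _
    rw [pvLoop_eq s s.length 0 0 (by omega) (by omega) (by omega)]
    simp only [pvBracketIdxs]
    rw [hO, hC, List.zip_map, List.map_map]
    have hge : ∀ b : Char, pvGe b s 0 = pvOccs b s := by
      intro b; simp [pvGe]
    rw [hge, hge]
    apply List.map_congr_left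
    intro p _
    simp [pvF, Function.comp, Prod.map]
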